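-- pv_equiv track=rewrite | github.com/LucasCta/Shortest-Route-Algorithms | graphs.py | DFS
-- ===== SOURCE A (Python) =====
-- def DFS(v,aL,pre,cpre):
--     cpre += 1
--     pre[v] = cpre
--     print (pre)
--     for i in aL[v]:
--         if pre[i] == 0:
--             pre, cpre = DFS(i,aL,pre,cpre)
--     return pre, cpre
-- ===== SOURCE B (Python) =====
-- def DFS(v, aL, pre, cpre):
--     cpre += 1
--     pre[v] = cpre
--     print(pre)
--     stack = [iter(aL[v])]
--     while stack:
--         i = next(stack[-1], None)
--         if i is None:
--             stack.pop()
--         elif pre[i] == 0: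
--             cpre += 1
--             pre[i] = cpre
--             print(pre)
--             stack.append(iter(aL[i]))
--     return pre, cpre
-- ===== Notes on version B (the rewrite author's own statement) =====
-- stated objective: alternative
-- what changed: The recursive DFS is replaced by an iterative traversal with an explicit stack of per-vertex neighbor iterators; discovery (counter increment, pre[v] assignment, print) happens on push, reproducing the exact preorder numbering, mutation and print sequence without recursion.
import Mathlib
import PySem

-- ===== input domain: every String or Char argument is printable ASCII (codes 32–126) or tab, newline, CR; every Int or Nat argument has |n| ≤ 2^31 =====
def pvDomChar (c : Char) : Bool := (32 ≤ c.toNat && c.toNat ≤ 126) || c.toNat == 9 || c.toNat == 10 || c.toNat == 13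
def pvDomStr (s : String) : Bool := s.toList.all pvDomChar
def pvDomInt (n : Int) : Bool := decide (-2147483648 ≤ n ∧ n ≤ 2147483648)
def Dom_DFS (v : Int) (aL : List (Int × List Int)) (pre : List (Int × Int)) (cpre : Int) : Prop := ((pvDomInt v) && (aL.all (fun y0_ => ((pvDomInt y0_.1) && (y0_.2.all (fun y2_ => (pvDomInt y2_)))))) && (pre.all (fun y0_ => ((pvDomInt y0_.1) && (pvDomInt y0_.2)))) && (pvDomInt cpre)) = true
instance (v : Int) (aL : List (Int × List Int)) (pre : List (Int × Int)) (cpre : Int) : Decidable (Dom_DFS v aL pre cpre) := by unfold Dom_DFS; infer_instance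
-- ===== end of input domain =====

-- B replaces A's recursive DFS by an iterative traversal with an explicit stack of neighbor
-- iterators (alternative decomposition, same cost).  Both Pythons mutate the dict `pre` in place
-- (identically) and print(pre) at each discovery; the equivalence proved here is about the RETURN value.

-- ===== PORT A =====
-- A is recursive on the graph; the Nat fuel is a pure termination guard (recursion depth).
-- `.error s` marks fuel exhaustion with the state s at that moment.  Since cpre is threaded and
-- strictly increasing, the value 0 is written at most once, so at most zeros(pre) + 2 visits ever
-- happen and the initial fuel pre.length + 3 exceeds any possible recursion depth; the guard is
-- unreachable whenever the Python returns.  pre[i] (Python KeyError on a missing key, excluded by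
-- Pre_DFS) is ported as getD pre i 1, whose default 1 ≠ 0 just skips the neighbor.
mutual
def DFSvisit (f : Nat) (v : Int) (aL : PySem.Dict Int (List Int)) (pre : PySem.Dict Int Int) (cpre : Int) :
    Except (PySem.Dict Int Int × Int) (PySem.Dict Int Int × Int) :=
  match f with
  | 0 => .error (pre, cpre)
  | Nat.succ f' =>
    let c := cpre + 1
    let p := pre.insert v c
    DFSfor f' (aL.getD v []) aL p c
termination_by (f, 0)

def DFSfor (f : Nat) (ns : List Int) (aL : PySem.Dict Int (List Int)) (pre : PySem.Dict Int Int) (cpre : Int) :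
    Except (PySem.Dict Int Int × Int) (PySem.Dict Int Int × Int) :=
  match ns with
  | [] => .ok (pre, cpre)
  | i :: rest =>
    if pre.getD i 1 == 0 then
      match DFSvisit f i aL pre cpre with
      | .error e => .error e
      | .ok (p, c) => DFSfor f rest aL p c
    else DFSfor f rest aL pre cpre
termination_by (f, ns.length + 1)
end

def DFS (v : Int) (aL : List (Int × List Int)) (pre : List (Int × Int)) (cpre : Int) : (List (Int × Int)) × Int :=
  match DFSvisit (pre.length + 2 + 1) v (PySem.Dict.mk aL) (PySem.Dict.mk pre) cpre with
  | .ok (p, c) => (p.items, c)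
  | .error (p, c) => (p.items, c)

-- ===== PORT B =====
-- Source B's stack of iterators: each frame is the not-yet-consumed tail of a neighbor list, plus a
-- Nat fuel (pure termination guard with the same depth budget as port A's, unreachable whenever
-- the Python returns).
def DFSmaxLen (l : List (Int × List Int)) : Nat := l.foldr (fun p m => max p.2.length m) 0

theorem DFS_getD_len_le (l : List (Int × List Int)) (i : Int) :
    (PySem.Dict.getD (PySem.Dict.mk l) i []).length ≤ DFSmaxLen l := by
  induction l with
  | nil => simp [PySem.Dict.getD, PySem.Dict.get?, DFSmaxLen]
  | cons hd tl ih =>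
    rw [PySem.Dict.getD_eq_get?_getD, PySem.Dict.get?_mk_cons]
    by_cases h : (hd.1 == i) = true
    · simp only [h, if_true, Option.getD_some]
      simp only [DFSmaxLen, List.foldr]
      omega
    · simp only [h, if_false, Bool.false_eq_true]
      rw [← PySem.Dict.getD_eq_get?_getD]
      have h2 : DFSmaxLen (hd :: tl) = max hd.2.length (DFSmaxLen tl) := rfl
      omega

def DFSstep (aL : PySem.Dict Int (List Int)) :
    List (Nat × List Int) → PySem.Dict Int Int → Int → PySem.Dict Int Int × Int
  | [], pre, cpre => (pre, cpre)
  | (_g, []) :: S, pre, cpre => DFSstep aL S pre cpre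
  | (f, i :: rest) :: S, pre, cpre =>
    if pre.getD i 1 == 0 then
      match f with
      | 0 => (pre, cpre)
      | Nat.succ f' =>
        let c := cpre + 1
        let p := pre.insert i c
        DFSstep aL ((f', aL.getD i []) :: (Nat.succ f', rest) :: S) p c
    else DFSstep aL ((f, rest) :: S) pre cpre
termination_by S _ _ => S.foldr (fun fr acc => (fr.2.length + 1) * (DFSmaxLen aL.items + 2) ^ fr.1 + acc) 0
decreasing_by
  · have h1 : 0 < (DFSmaxLen aL.items + 2) ^ _g := Nat.pow_pos (by omega)
    simp only [List.foldr, List.length_nil]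
    omega
  · have h1 : 0 < (DFSmaxLen aL.items + 2) ^ f' := Nat.pow_pos (by omega)
    have h2 : (PySem.Dict.getD aL i []).length ≤ DFSmaxLen aL.items := by
      have h := DFS_getD_len_le aL.items i
      simpa using h
    have h3 : (DFSmaxLen aL.items + 2) ^ (f' + 1) = (DFSmaxLen aL.items + 2) * (DFSmaxLen aL.items + 2) ^ f' := by
      rw [pow_succ]; ring
    have h4 : ((PySem.Dict.getD aL i []).length + 1) * (DFSmaxLen aL.items + 2) ^ f'
        ≤ (DFSmaxLen aL.items + 1) * (DFSmaxLen aL.items + 2) ^ f' :=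
      Nat.mul_le_mul_right _ (by omega)
    simp only [List.foldr, List.length_cons, Nat.succ_eq_add_one]
    nlinarith [h1, h2, h3, h4]
  · have h1 : 0 < (DFSmaxLen aL.items + 2) ^ f := Nat.pow_pos (by omega)
    simp only [List.foldr, List.length_cons]
    nlinarith [h1]

def DFS_alt (v : Int) (aL : List (Int × List Int)) (pre : List (Int × Int)) (cpre : Int) : (List (Int × Int)) × Int :=
  let aLd := PySem.Dict.mk aL
  let pred := PySem.Dict.mk pre
  let c := cpre + 1
  let p := pred.insert v c
  let r := DFSstep aLd [(pre.length + 2, aLd.getD v [])] p c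
  (r.1.items, r.2)

-- ===== PRECONDITION & SPEC =====
-- Pre_DFS excludes exactly the inputs on which Python A raises KeyError: it asks for a set R of
-- keys of aL that contains the start vertex, is closed under edges into vertices whose initial
-- preorder value is 0 (those are the ones the traversal descends into), and all of whose members
-- list only neighbors that are keys of pre (or v itself, which pre[v] = cpre keys immediately).
-- Such an R exists iff every lookup aL[..]/pre[..] the traversal performs succeeds.  A always
-- terminates otherwise (cpre strictly increases, so 0 is written at most once and at most
-- zeros(pre) + 2 visits happen), so no other input is excluded.
def Pre_DFS (v : Int) (aL : List (Int × List Int)) (pre : List (Int × Int)) (cpre : Int) : Prop :=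
  ∃ R ∈ (PySem.Dict.mk aL).keys.sublists, v ∈ R ∧
    ∀ u ∈ R, ∀ i ∈ (PySem.Dict.mk aL).getD u [],
      ((PySem.Dict.mk pre).contains i = true ∨ i = v) ∧
      ((PySem.Dict.mk pre).getD i 1 = 0 → i ∈ R)
instance (v : Int) (aL : List (Int × List Int)) (pre : List (Int × Int)) (cpre : Int) : Decidable (Pre_DFS v aL pre cpre) := by unfold Pre_DFS; infer_instance

def pvWitness_DFS : Int × (List (Int × List Int)) × (List (Int × Int)) × Int :=
  (0, [(0, [1]), (1, [0])], [(0, 0), (1, 0)], 0)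

def Spec_DFS (v : Int) (aL : List (Int × List Int)) (pre : List (Int × Int)) (cpre : Int) (out : (List (Int × Int)) × Int) : Prop := out = DFS_alt v aL pre cpre
instance (v : Int) (aL : List (Int × List Int)) (pre : List (Int × Int)) (cpre : Int) (out : (List (Int × Int)) × Int) : Decidable (Spec_DFS v aL pre cpre out) := by unfold Spec_DFS; infer_instance

-- ===== CLAIM (what is proved, stated in full; the proofs are below) =====
def Claim_equal_DFS : Prop := ∀ (v : Int) (aL : List (Int × List Int)) (pre : List (Int × Int)) (cpre : Int), Dom_DFS v aL pre cpre → Pre_DFS v aL pre cpre → Spec_DFS v aL pre cpre (DFS v aL pre cpre)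

-- ===== LEMMAS AND PROOFS =====
-- The bridge: running B's loop with frame (f, ns) on top of stack S is running A's for-loop
-- DFSfor f ns and then continuing with S (an error = fuel exhaustion hard-returns the state).
theorem DFS_bridge (aL : PySem.Dict Int (List Int)) (f : Nat) (ns : List Int)
    (S : List (Nat × List Int)) (pre : PySem.Dict Int Int) (cpre : Int) :
    DFSstep aL ((f, ns) :: S) pre cpre =
      match DFSfor f ns aL pre cpre with
      | .error e => e
      | .ok (p, c) => DFSstep aL S p c := by
  match ns with
  | [] => simp [DFSstep, DFSfor]
  | i :: rest =>
    by_cases h : (pre.getD i 1 == 0) = true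
    · match f with
      | 0 =>
        simp [DFSstep, DFSfor, DFSvisit, h]
      | Nat.succ f' =>
        rw [show DFSstep aL ((Nat.succ f', i :: rest) :: S) pre cpre =
              DFSstep aL ((f', aL.getD i []) :: (Nat.succ f', rest) :: S)
                (pre.insert i (cpre + 1)) (cpre + 1) by
            simp [DFSstep, h]]
        rw [DFS_bridge aL f' (aL.getD i []) ((Nat.succ f', rest) :: S) (pre.insert i (cpre + 1)) (cpre + 1)]
        rw [show DFSfor (Nat.succ f') (i :: rest) aL pre cpre =
              match DFSfor f' (aL.getD i []) aL (pre.insert i (cpre + 1)) (cpre + 1) with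
              | .error e => .error e
              | .ok (p, c) => DFSfor (Nat.succ f') rest aL p c by
            simp [DFSfor, DFSvisit, h]]
        cases hres : DFSfor f' (aL.getD i []) aL (pre.insert i (cpre + 1)) (cpre + 1) with
        | error e => rfl
        | ok pc =>
          obtain ⟨p2, c2⟩ := pc
          exact DFS_bridge aL (Nat.succ f') rest S p2 c2
    · have hstep : DFSstep aL ((f, i :: rest) :: S) pre cpre = DFSstep aL ((f, rest) :: S) pre cpre := by
        cases f <;> simp [DFSstep, h]
      have hfor : DFSfor f (i :: rest) aL pre cpre = DFSfor f rest aL pre cpre := by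
        simp [DFSfor, h]
      rw [hstep, hfor]
      exact DFS_bridge aL f rest S pre cpre
termination_by (f, ns.length)

-- ===== VERDICT (by name: the statement is the Claim_ definition above) =====
theorem DFS_spec : Claim_equal_DFS := by
  intro v aL pre cpre _ _
  unfold Spec_DFS DFS DFS_alt
  dsimp only
  rw [show DFSvisit (pre.length + 2 + 1) v (PySem.Dict.mk aL) (PySem.Dict.mk pre) cpre =
        DFSfor (pre.length + 2) ((PySem.Dict.mk aL).getD v []) (PySem.Dict.mk aL)
          ((PySem.Dict.mk pre).insert v (cpre + 1)) (cpre + 1) by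
      simp [DFSvisit]]
  rw [DFS_bridge]
  cases DFSfor (pre.length + 2) ((PySem.Dict.mk aL).getD v []) (PySem.Dict.mk aL)
      ((PySem.Dict.mk pre).insert v (cpre + 1)) (cpre + 1) with
  | error e => rfl
  | ok pc => obtain ⟨p, c⟩ := pc; simp [DFSstep]
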